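-- pv_equiv track=rewrite | github.com/NickJD/GeneFragValidator | Genome_Processing/genome_split.py | split_genome
-- ===== SOURCE A (Python) =====
-- def split_genome(sequence, cds_annotations, chunk_size=150, overlap=20):
--     chunks = []
--     for i in range(0, len(sequence), chunk_size - overlap):
--         end = min(i + chunk_size, len(sequence))
--         chunk_seq = sequence[i:end]
--         chunk_cds = [(start, end) for start, end in cds_annotations if start < i + chunk_size and end > i]
--         chunks.append((i, end, chunk_seq, chunk_cds))
--     return chunks
-- ===== SOURCE B (Python) =====
-- def split_genome(sequence, cds_annotations, chunk_size=150, overlap=20):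
--     step = chunk_size - overlap
--     n = len(sequence)
--     num = (n + step - 1) // step if step > 0 else 0
--     buckets = [[] for _ in range(num)]
--     if num > 0:
--         for s, e in cds_annotations:
--             klo = max(0, (s - chunk_size) // step + 1)
--             khi = min(num - 1, (e - 1) // step)
--             for k in range(klo, khi + 1):
--                 buckets[k].append((s, e))
--     out = []
--     for k in range(num):
--         i = k * step
--         end = min(i + chunk_size, n)
--         out.append((i, end, sequence[i:end], buckets[k]))
--     return out
-- ===== Notes on version B (the rewrite author's own statement) =====
-- stated objective: faster
-- what changed: Instead of rescanning the whole annotation list for every window, B computes for each annotation the closed-form interval of chunk indices it overlaps and scatters it into per-chunk buckets once, then emits the chunks.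
import Mathlib
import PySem

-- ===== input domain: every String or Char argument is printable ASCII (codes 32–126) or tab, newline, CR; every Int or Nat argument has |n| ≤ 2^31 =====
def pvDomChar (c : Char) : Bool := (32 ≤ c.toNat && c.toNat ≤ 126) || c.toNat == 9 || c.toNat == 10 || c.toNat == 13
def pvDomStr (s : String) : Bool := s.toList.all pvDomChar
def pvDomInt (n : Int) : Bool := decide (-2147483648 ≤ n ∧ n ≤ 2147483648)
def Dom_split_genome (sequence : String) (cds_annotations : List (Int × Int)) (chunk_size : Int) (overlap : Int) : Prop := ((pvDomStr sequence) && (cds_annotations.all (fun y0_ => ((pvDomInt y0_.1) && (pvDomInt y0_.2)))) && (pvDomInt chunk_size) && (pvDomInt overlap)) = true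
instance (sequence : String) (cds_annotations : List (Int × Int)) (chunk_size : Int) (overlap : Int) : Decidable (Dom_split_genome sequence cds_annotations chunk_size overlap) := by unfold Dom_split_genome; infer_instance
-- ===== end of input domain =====

-- B replaces A's per-window rescan of the whole annotation list by a per-annotation scatter into
-- per-chunk buckets (closed-form chunk-index interval for each annotation): O(W*C) work becomes O(C + W + output).


-- ===== PORT A =====
def split_genome (sequence : String) (cds_annotations : List (Int × Int)) (chunk_size : Int) (overlap : Int) : List (Int × Int × String × (List (Int × Int))) :=
  (PySem.List.pyRange 0 (PySem.Str.len sequence) (chunk_size - overlap)).foldl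
    (fun chunks i =>
      let e := min (i + chunk_size) (PySem.Str.len sequence)
      let chunk_seq := PySem.Str.slice sequence (some i) (some e)
      let chunk_cds := cds_annotations.filter (fun p => decide (p.1 < i + chunk_size) && decide (p.2 > i))
      chunks ++ [(i, e, chunk_seq, chunk_cds)]) []

-- ===== PORT B =====
-- buckets[k].append(p): k is produced by range(klo, khi+1) with 0 ≤ klo and khi < num = len(buckets),
-- so the index is always in range; getD's default is never used.
def split_genome_alt (sequence : String) (cds_annotations : List (Int × Int)) (chunk_size : Int) (overlap : Int) : List (Int × Int × String × (List (Int × Int))) :=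
  let step := chunk_size - overlap
  let n : Int := PySem.Str.len sequence
  let num : Int := if 0 < step then PySem.Int.floordiv (n + step - 1) step else 0
  let buckets0 : List (List (Int × Int)) := List.replicate num.toNat []
  let buckets :=
    if 0 < num then
      cds_annotations.foldl (fun bs p =>
        let klo := max 0 (PySem.Int.floordiv (p.1 - chunk_size) step + 1)
        let khi := min (num - 1) (PySem.Int.floordiv (p.2 - 1) step)
        (PySem.List.pyRange klo (khi + 1) 1).foldl
          (fun bs k => bs.set k.toNat (bs.getD k.toNat [] ++ [p])) bs) buckets0
    else buckets0
  (PySem.List.pyRange 0 num 1).foldl (fun out k =>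
    let i := k * step
    let e := min (i + chunk_size) n
    out ++ [(i, e, PySem.Str.slice sequence (some i) (some e), PySem.List.pyGetD buckets k [])]) []

-- ===== PRECONDITION & SPEC =====
-- Pre_ excludes only chunk_size = overlap, where Python A raises ValueError (range() step 0).
def Pre_split_genome (sequence : String) (cds_annotations : List (Int × Int)) (chunk_size : Int) (overlap : Int) : Prop := chunk_size - overlap ≠ 0
instance (sequence : String) (cds_annotations : List (Int × Int)) (chunk_size : Int) (overlap : Int) : Decidable (Pre_split_genome sequence cds_annotations chunk_size overlap) := by unfold Pre_split_genome; infer_instance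
def pvWitness_split_genome : String × (List (Int × Int)) × Int × Int := ("ACGTACGTAC", [(1, 5), (3, 9)], 6, 2)

def Spec_split_genome (sequence : String) (cds_annotations : List (Int × Int)) (chunk_size : Int) (overlap : Int) (out : List (Int × Int × String × (List (Int × Int)))) : Prop := out = split_genome_alt sequence cds_annotations chunk_size overlap
instance (sequence : String) (cds_annotations : List (Int × Int)) (chunk_size : Int) (overlap : Int) (out : List (Int × Int × String × (List (Int × Int)))) : Decidable (Spec_split_genome sequence cds_annotations chunk_size overlap out) := by unfold Spec_split_genome; infer_instance

-- ===== CLAIM (what is proved, stated in full; the proofs are below) =====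
def Claim_equal_split_genome : Prop := ∀ (sequence : String) (cds_annotations : List (Int × Int)) (chunk_size : Int) (overlap : Int), Dom_split_genome sequence cds_annotations chunk_size overlap → Pre_split_genome sequence cds_annotations chunk_size overlap → Spec_split_genome sequence cds_annotations chunk_size overlap (split_genome sequence cds_annotations chunk_size overlap)

-- ===== LEMMAS AND PROOFS =====


lemma getD_set' {α : Type} (l : List α) (i j : Nat) (v d : α) :
    (l.set i v).getD j d = if i = j ∧ j < l.length then v else l.getD j d := by
  simp only [List.getD, List.getElem?_set]
  split_ifs with h1 h2 h3 h3 <;> simp_all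

lemma scatter_length (p : Int × Int) (a b : Int) (bs : List (List (Int × Int))) :
    ((PySem.List.pyRange a b 1).foldl
        (fun bs k => bs.set k.toNat (bs.getD k.toNat [] ++ [p])) bs).length = bs.length := by
  induction PySem.List.pyRange a b 1 generalizing bs with
  | nil => rfl
  | cons x xs ih => rw [List.foldl_cons, ih, List.length_set]

lemma scatter_getD (p : Int × Int) (a b : Int) (ha : 0 ≤ a) :
    ∀ (bs : List (List (Int × Int))) (j : Nat), (b ≤ (j : Int) ∨ (j : Int) < a ∨ j < bs.length) →
    ((PySem.List.pyRange a b 1).foldl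
        (fun bs k => bs.set k.toNat (bs.getD k.toNat [] ++ [p])) bs).getD j []
      = if a ≤ (j : Int) ∧ (j : Int) < b then bs.getD j [] ++ [p] else bs.getD j [] := by
  obtain ⟨m, hm⟩ : ∃ m : Nat, (b - a).toNat = m := ⟨_, rfl⟩
  induction m generalizing a with
  | zero =>
    intro bs j _
    rw [PySem.List.pyRange_one_eq_nil (by omega), if_neg (by omega)]
    rfl
  | succ m ih =>
    intro bs j hjl
    have hab : a < b := by omega
    rw [PySem.List.pyRange_one_cons hab, List.foldl_cons]
    set bs' := bs.set a.toNat (bs.getD a.toNat [] ++ [p]) with hbs'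
    have hlen : bs'.length = bs.length := List.length_set ..
    have hjl' : b ≤ (j : Int) ∨ (j : Int) < a + 1 ∨ j < bs'.length := by
      rcases hjl with h | h | h
      · left; omega
      · right; left; omega
      · right; right; omega
    rw [ih (a + 1) (by omega) (by omega) bs' j hjl']
    have hset : bs'.getD j [] = if a.toNat = j ∧ j < bs.length then bs.getD a.toNat [] ++ [p] else bs.getD j [] :=
      getD_set' ..
    rw [hset]
    by_cases h2 : (j : Int) = a
    · have hjlen : j < bs.length := by rcases hjl with h | h | h; omega; omega; exact h
      have hjb : (j : Int) < b := by omega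
      rw [if_neg (by omega : ¬ (a + 1 ≤ (j : Int) ∧ (j : Int) < b)),
          if_pos (⟨by omega, hjlen⟩ : a.toNat = j ∧ j < bs.length),
          if_pos (⟨by omega, hjb⟩ : a ≤ (j : Int) ∧ (j : Int) < b)]
      congr 2
      omega
    · rw [if_neg (by omega : ¬ (a.toNat = j ∧ j < bs.length))]
      by_cases h1 : a + 1 ≤ (j : Int) ∧ (j : Int) < b
      · rw [if_pos h1, if_pos (by omega : a ≤ (j : Int) ∧ (j : Int) < b)]
      · rw [if_neg h1, if_neg (by omega : ¬ (a ≤ (j : Int) ∧ (j : Int) < b))]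

lemma range_iff (cs step num : Int) (hs : 0 < step) (p : Int × Int) (j : Int)
    (hj0 : 0 ≤ j) (hjn : j < num) :
    (max 0 (PySem.Int.floordiv (p.1 - cs) step + 1) ≤ j ∧
      j < min (num - 1) (PySem.Int.floordiv (p.2 - 1) step) + 1)
    ↔ (p.1 < j * step + cs ∧ p.2 > j * step) := by
  have h1 := (PySem.Int.floordiv_lt_iff_lt_mul (a := p.1 - cs) (q := j) hs)
  have h2 := (PySem.Int.le_floordiv_iff_mul_le (a := p.2 - 1) (q := j) hs)
  generalize j * step = t at h1 h2 ⊢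
  omega

lemma buckets_getD (cs step num : Int) (hs : 0 < step) (cds : List (Int × Int)) :
    ∀ (bs : List (List (Int × Int))) (j : Nat), bs.length = num.toNat → (j : Int) < num →
    ((cds.foldl (fun bs p =>
        (PySem.List.pyRange (max 0 (PySem.Int.floordiv (p.1 - cs) step + 1))
            (min (num - 1) (PySem.Int.floordiv (p.2 - 1) step) + 1) 1).foldl
          (fun bs k => bs.set k.toNat (bs.getD k.toNat [] ++ [p])) bs) bs).getD j [])
      = bs.getD j [] ++ cds.filter (fun p => decide (p.1 < (j : Int) * step + cs) && decide (p.2 > (j : Int) * step)) := by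
  induction cds with
  | nil => intro bs j _ _; simp
  | cons p cds ih =>
    intro bs j hlen hj
    rw [List.foldl_cons]
    set bs1 := (PySem.List.pyRange (max 0 (PySem.Int.floordiv (p.1 - cs) step + 1))
            (min (num - 1) (PySem.Int.floordiv (p.2 - 1) step) + 1) 1).foldl
          (fun bs k => bs.set k.toNat (bs.getD k.toNat [] ++ [p])) bs with hbs1
    have hlen1 : bs1.length = num.toNat := by rw [hbs1, scatter_length, hlen]
    rw [ih bs1 j hlen1 hj]
    have hget : bs1.getD j [] =
        if max 0 (PySem.Int.floordiv (p.1 - cs) step + 1) ≤ (j : Int) ∧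
           (j : Int) < min (num - 1) (PySem.Int.floordiv (p.2 - 1) step) + 1
        then bs.getD j [] ++ [p] else bs.getD j [] := by
      rw [hbs1]
      exact scatter_getD p _ _ (by omega) bs j (by right; right; omega)
    rw [hget, List.filter_cons]
    by_cases hc : p.1 < (j : Int) * step + cs ∧ p.2 > (j : Int) * step
    · rw [if_pos ((range_iff cs step num hs p j (by omega) hj).mpr hc)]
      have : (decide (p.1 < (j : Int) * step + cs) && decide (p.2 > (j : Int) * step)) = true := by
        simp [hc.1, hc.2]
      rw [this]
      simp
    · rw [if_neg (fun h => hc ((range_iff cs step num hs p j (by omega) hj).mp h))]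
      have : (decide (p.1 < (j : Int) * step + cs) && decide (p.2 > (j : Int) * step)) = false := by
        simp only [Bool.and_eq_false_iff, decide_eq_false_iff_not]
        by_cases h1 : p.1 < (j : Int) * step + cs
        · right; intro h2; exact hc ⟨h1, h2⟩
        · left; exact h1
      rw [this]
      simp


lemma split_genome_eq (sequence : String) (cds : List (Int × Int)) (cs ov : Int) (hpre : cs - ov ≠ 0) :
    split_genome sequence cds cs ov = split_genome_alt sequence cds cs ov := by
  have hn : 0 ≤ PySem.Str.len sequence := by simp [PySem.Str.len_eq]
  set n := PySem.Str.len sequence with hdefn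
  set step := cs - ov with hdefstep
  by_cases hs : 0 < step
  · -- positive step
    unfold split_genome split_genome_alt
    simp only
    rw [← hdefn, ← hdefstep, if_pos hs]
    set num := PySem.Int.floordiv (n + step - 1) step with hdefnum
    have hnum0 : 0 ≤ num := by
      rw [hdefnum]
      exact (PySem.Int.le_floordiv_iff_mul_le hs).mpr (by omega)
    have hcnt : (if (0:Int) < n then ((n + step - 1) / step).toNat else 0) = num.toNat := by
      by_cases h0 : (0:Int) < n
      · rw [if_pos h0, hdefnum, PySem.Int.floordiv_eq_ediv_of_pos hs]
      · rw [if_neg h0]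
        have hn0 : n = 0 := by omega
        have hz : num = 0 := by
          have h2 : num < 1 := by
            rw [hdefnum, hn0]
            exact (PySem.Int.floordiv_lt_iff_lt_mul hs).mpr (by omega)
          omega
        rw [hz]
        rfl
    rw [PySem.List.pyRange_of_pos 0 n hs, PySem.List.pyRange_one 0 num]
    simp only [sub_zero, hcnt]
    rw [PySem.List.foldl_append_singleton_eq_map, PySem.List.foldl_append_singleton_eq_map]
    simp only [List.map_map, List.nil_append]
    apply List.map_congr_left
    intro k hk
    simp only [Function.comp_apply, zero_add]
    have hknum : (k : Int) < num := by
      rw [List.mem_range] at hk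
      omega
    rw [mul_comm step (k : Int), if_pos (show 0 < num by omega), PySem.List.pyGetD_natCast,
        buckets_getD cs step num hs cds (List.replicate num.toNat []) k (List.length_replicate) hknum]
    simp
  · -- negative step: both sides are []
    have hneg : step < 0 := by omega
    unfold split_genome split_genome_alt
    simp only
    rw [← hdefn, ← hdefstep, if_neg hs]
    rw [show PySem.List.pyRange 0 n step = [] by
      simp only [PySem.List.pyRange, hpre, if_false, if_neg hs, if_neg (by omega : ¬ n < 0)]
      simp]
    rw [show PySem.List.pyRange 0 0 1 = [] from PySem.List.pyRange_one_eq_nil le_rfl]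
    rfl

-- ===== VERDICT (by name: the statement is the Claim_ definition above) =====
theorem split_genome_spec : Claim_equal_split_genome := by
  intro sequence cds_annotations chunk_size overlap _ hpre
  unfold Spec_split_genome
  exact split_genome_eq sequence cds_annotations chunk_size overlap hpre
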